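-- pv_equiv track=rewrite | github.com/vikijoy/seminar3.py | seminar3.py | max_weight_count
-- ===== SOURCE A (Python) =====
-- def max_weight_count(weight: int) -> list:
--     mass = weight * 1000
--     result = []
--     things = {'зажигалка': 20, 'компас': 100, 'фрукты': 500, 'рубашка': 300, 'термос': 1000, 'аптечка': 200,
--               'куртка': 600, 'бинокль': 400, 'удочка': 1200, 'салфетки': 40, 'бутерброды': 820, 'палатка': 5500,
--               'спальный мешок': 2250, 'жвачка': 10}
--     modified_things = dict(sorted(things.items(), key=lambda x: -x[1]))
--     for thing, vess in modified_things.items():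
--         if vess < mass:
--             result.append(thing)
--             mass -= vess
--     return result
-- ===== SOURCE B (Python) =====
-- def max_weight_count(weight: int) -> list:
--     # Different decomposition: no sort; repeatedly scan remaining items for the
--     # heaviest item strictly lighter than the remaining mass, take it, remove it.
--     mass = weight * 1000
--     remaining = {'зажигалка': 20, 'компас': 100, 'фрукты': 500, 'рубашка': 300, 'термос': 1000, 'аптечка': 200,
--                  'куртка': 600, 'бинокль': 400, 'удочка': 1200, 'салфетки': 40, 'бутерброды': 820, 'палатка': 5500,
--                  'спальный мешок': 2250, 'жвачка': 10}
--     result = []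
--     while True:
--         best = None
--         for thing, vess in remaining.items():
--             if vess < mass and (best is None or vess > remaining[best]):
--                 best = thing
--         if best is None:
--             return result
--         result.append(best)
--         mass -= remaining.pop(best)
-- ===== Notes on version B (the rewrite author's own statement) =====
-- stated objective: alternative
-- what changed: B drops the sort entirely: instead of sorting the items descending once and doing one pass, it keeps a dict of remaining items and repeatedly scans it for the heaviest item strictly lighter than the remaining mass, taking and removing it until none qualifies.
import Mathlib
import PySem

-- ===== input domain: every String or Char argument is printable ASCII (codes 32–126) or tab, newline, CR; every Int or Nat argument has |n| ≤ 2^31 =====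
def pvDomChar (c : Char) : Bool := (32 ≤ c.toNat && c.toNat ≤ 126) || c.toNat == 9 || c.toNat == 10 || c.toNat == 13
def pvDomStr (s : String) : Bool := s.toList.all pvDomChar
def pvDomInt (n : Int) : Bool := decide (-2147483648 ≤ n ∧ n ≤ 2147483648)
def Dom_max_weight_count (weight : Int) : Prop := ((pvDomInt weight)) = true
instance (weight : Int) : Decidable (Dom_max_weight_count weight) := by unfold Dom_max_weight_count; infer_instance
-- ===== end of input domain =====

-- B replaces A's sort-then-single-pass by a sort-free repeated max-scan over the remaining items (objective: alternative, same result).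

-- ===== PORT A =====
-- the for-loop of A: for thing, vess in modified_things.items(): if vess < mass: append; mass -= vess
def aLoop : List (String × Int) → Int → List String → List String
  | [], _, result => result
  | (thing, vess) :: rest, mass, result =>
      if vess < mass then aLoop rest (mass - vess) (result ++ [thing])
      else aLoop rest mass result

def max_weight_count (weight : Int) : List String :=
  let mass := weight * 1000
  let things : PySem.Dict String Int := PySem.Dict.ofList [("зажигалка", 20), ("компас", 100), ("фрукты", 500), ("рубашка", 300), ("термос", 1000), ("аптечка", 200), ("куртка", 600), ("бинокль", 400), ("удочка", 1200), ("салфетки", 40), ("бутерброды", 820), ("палатка", 5500), ("спальный мешок", 2250), ("жвачка", 10)]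
  let modified_things : PySem.Dict String Int :=
    PySem.Dict.ofList (PySem.List.sorted things.items (fun x => -x.2) false)
  aLoop modified_things.items mass []

-- ===== PORT B =====
-- 'best is None or vess > remaining[best]' of Source B (best carries its weight alongside the name)
def bBetter : Option (String × Int) → Int → Bool
  | none, _ => true
  | some b, vess => decide (b.2 < vess)

-- inner for-loop of Source B: scan the remaining items keeping the best (heaviest item lighter than mass) seen so far
def bScan : List (String × Int) → Int → Option (String × Int) → Option (String × Int)
  | [], _, best => best
  | (thing, vess) :: rest, mass, best =>
      bScan rest mass
        (if (decide (vess < mass) && bBetter best vess) = true then some (thing, vess) else best)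

-- remaining.pop(best): drop the (unique) entry with that key
def bRemove : String → List (String × Int) → List (String × Int)
  | _, [] => []
  | k, p :: rest => if p.1 = k then rest else p :: bRemove k rest

-- the while-loop of Source B; fuel = |remaining| + 1 suffices since every round removes one item
def bLoop : Nat → Int → List (String × Int) → List String → List String
  | 0, _, _, result => result
  | fuel + 1, mass, remaining, result =>
      (bScan remaining mass none).elim result
        (fun b => bLoop fuel (mass - b.2) (bRemove b.1 remaining) (result ++ [b.1]))

def max_weight_count_alt (weight : Int) : List String :=
  let remaining : List (String × Int) := [("зажигалка", 20), ("компас", 100), ("фрукты", 500), ("рубашка", 300), ("термос", 1000), ("аптечка", 200), ("куртка", 600), ("бинокль", 400), ("удочка", 1200), ("салфетки", 40), ("бутерброды", 820), ("палатка", 5500), ("спальный мешок", 2250), ("жвачка", 10)]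
  bLoop (remaining.length + 1) (weight * 1000) remaining []

-- ===== PRECONDITION & SPEC =====
def Spec_max_weight_count (weight : Int) (out : List String) : Prop := out = max_weight_count_alt weight
instance (weight : Int) (out : List String) : Decidable (Spec_max_weight_count weight out) := by unfold Spec_max_weight_count; infer_instance

-- ===== CLAIM (what is proved, stated in full; the proofs are below) =====
def Claim_equal_max_weight_count : Prop := ∀ (weight : Int), Dom_max_weight_count weight → Spec_max_weight_count weight (max_weight_count weight)

-- ===== LEMMAS AND PROOFS =====

-- the full pick list: for mass beyond the total weight both programs take everything, in descending weight order
def pvFullPick : List String := ["палатка", "спальный мешок", "удочка", "термос", "бутерброды", "куртка", "фрукты", "бинокль", "рубашка", "аптечка", "компас", "салфетки", "зажигалка", "жвачка"]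

lemma bLoop_step (f : Nat) (mass : Int) (rem : List (String × Int)) (res : List String) :
    bLoop (f + 1) mass rem res =
      (bScan rem mass none).elim res
        (fun b => bLoop f (mass - b.2) (bRemove b.1 rem) (res ++ [b.1])) := rfl

-- mass-independent form of the scan once every remaining item is strictly lighter than mass
def pvPureBest : List (String × Int) → Option (String × Int) → Option (String × Int)
  | [], best => best
  | (thing, vess) :: rest, best =>
      pvPureBest rest (if bBetter best vess = true then some (thing, vess) else best)

lemma bScan_eq (l : List (String × Int)) : ∀ (mass : Int) (best : Option (String × Int)),
    (∀ p ∈ l, p.2 < mass) → bScan l mass best = pvPureBest l best := by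
  induction l with
  | nil => intro _ _ _; rfl
  | cons p rest ih =>
      intro mass best h
      obtain ⟨t, v⟩ := p
      rw [bScan, pvPureBest, decide_eq_true (h (t, v) (List.mem_cons_self)), Bool.true_and]
      exact ih mass _ (fun q hq => h q (List.mem_cons_of_mem _ hq))

lemma bScan_none (l : List (String × Int)) (mass : Int) (h : ∀ p ∈ l, ¬ (p.2 < mass)) :
    bScan l mass none = none := by
  induction l with
  | nil => rfl
  | cons p rest ih =>
      obtain ⟨t, v⟩ := p
      rw [bScan, decide_eq_false (h (t, v) (List.mem_cons_self)), Bool.false_and,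
        if_neg (by simp)]
      exact ih (fun q hq => h q (List.mem_cons_of_mem _ hq))

lemma aLoop_none (l : List (String × Int)) (mass : Int) (res : List String)
    (h : ∀ p ∈ l, ¬ (p.2 < mass)) : aLoop l mass res = res := by
  induction l with
  | nil => rfl
  | cons p rest ih =>
      obtain ⟨t, v⟩ := p
      rw [aLoop, if_neg (h (t, v) (List.mem_cons_self))]
      exact ih (fun q hq => h q (List.mem_cons_of_mem _ hq))

lemma aLoop_all (l : List (String × Int)) : ∀ (mass : Int) (res : List String),
    (∀ p ∈ l, 0 < p.2) → (l.map Prod.snd).sum < mass →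
    aLoop l mass res = res ++ l.map Prod.fst := by
  induction l with
  | nil => intro mass res _ _; simp [aLoop]
  | cons p rest ih =>
      intro mass res hpos hsum
      obtain ⟨t, v⟩ := p
      simp only [List.map_cons, List.sum_cons] at hsum
      have hrest : 0 ≤ (rest.map Prod.snd).sum :=
        List.sum_nonneg (by
          intro x hx
          obtain ⟨q, hq, rfl⟩ := List.mem_map.mp hx
          exact le_of_lt (hpos q (List.mem_cons_of_mem _ hq)))
      rw [aLoop, if_pos (by omega),
        ih (mass - v) (res ++ [t]) (fun q hq => hpos q (List.mem_cons_of_mem _ hq)) (by omega)]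
      simp

lemma a_items_eq :
    (PySem.Dict.ofList (PySem.List.sorted
      (PySem.Dict.ofList ([("зажигалка", 20), ("компас", 100), ("фрукты", 500), ("рубашка", 300), ("термос", 1000), ("аптечка", 200), ("куртка", 600), ("бинокль", 400), ("удочка", 1200), ("салфетки", 40), ("бутерброды", 820), ("палатка", 5500), ("спальный мешок", 2250), ("жвачка", 10)] : List (String × Int))).items
      (fun x => -x.2) false)).items = ([("палатка", 5500), ("спальный мешок", 2250), ("удочка", 1200), ("термос", 1000), ("бутерброды", 820), ("куртка", 600), ("фрукты", 500), ("бинокль", 400), ("рубашка", 300), ("аптечка", 200), ("компас", 100), ("салфетки", 40), ("зажигалка", 20), ("жвачка", 10)] : List (String × Int)) := by decide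

lemma a_nonpos (w : Int) (h : w ≤ 0) : max_weight_count w = [] := by
  simp only [max_weight_count]
  rw [a_items_eq]
  exact aLoop_none _ _ _ (by intro p hp; fin_cases hp <;> (try simp) <;> omega)

lemma b_nonpos (w : Int) (h : w ≤ 0) : max_weight_count_alt w = [] := by
  show bLoop 15 (w * 1000) _ [] = []
  rw [show (15:Nat) = 14+1 from rfl, bLoop_step,
    bScan_none _ _ (by intro p hp; fin_cases hp <;> (try simp) <;> omega)]
  rfl

lemma a_big (w : Int) (h : 13 ≤ w) : max_weight_count w = pvFullPick := by
  simp only [max_weight_count]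
  rw [a_items_eq,
    aLoop_all _ _ _ (by intro p hp; fin_cases hp <;> simp)
      (by simp; omega)]
  rfl

lemma b_big (w : Int) (h : 13 ≤ w) : max_weight_count_alt w = pvFullPick := by
  show bLoop 15 (w * 1000) _ [] = pvFullPick
  rw [show (15:Nat) = 14+1 from rfl, bLoop_step,
      bScan_eq [("зажигалка", 20), ("компас", 100), ("фрукты", 500), ("рубашка", 300), ("термос", 1000), ("аптечка", 200), ("куртка", 600), ("бинокль", 400), ("удочка", 1200), ("салфетки", 40), ("бутерброды", 820), ("палатка", 5500), ("спальный мешок", 2250), ("жвачка", 10)] (w * 1000) none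
        (by intro p hp; fin_cases hp <;> (try simp) <;> omega),
      show pvPureBest [("зажигалка", 20), ("компас", 100), ("фрукты", 500), ("рубашка", 300), ("термос", 1000), ("аптечка", 200), ("куртка", 600), ("бинокль", 400), ("удочка", 1200), ("салфетки", 40), ("бутерброды", 820), ("палатка", 5500), ("спальный мешок", 2250), ("жвачка", 10)] none = some ("палатка", 5500) from by decide]
  simp only [Option.elim_some]
  norm_num [sub_sub]
  rw [show bRemove "палатка" [("зажигалка", 20), ("компас", 100), ("фрукты", 500), ("рубашка", 300), ("термос", 1000), ("аптечка", 200), ("куртка", 600), ("бинокль", 400), ("удочка", 1200), ("салфетки", 40), ("бутерброды", 820), ("палатка", 5500), ("спальный мешок", 2250), ("жвачка", 10)] = [("зажигалка", 20), ("компас", 100), ("фрукты", 500), ("рубашка", 300), ("термос", 1000), ("аптечка", 200), ("куртка", 600), ("бинокль", 400), ("удочка", 1200), ("салфетки", 40), ("бутерброды", 820), ("спальный мешок", 2250), ("жвачка", 10)] from by decide]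
  rw [show (14:Nat) = 13+1 from rfl, bLoop_step,
      bScan_eq [("зажигалка", 20), ("компас", 100), ("фрукты", 500), ("рубашка", 300), ("термос", 1000), ("аптечка", 200), ("куртка", 600), ("бинокль", 400), ("удочка", 1200), ("салфетки", 40), ("бутерброды", 820), ("спальный мешок", 2250), ("жвачка", 10)] (w * 1000 - 5500) none
        (by intro p hp; fin_cases hp <;> (try simp) <;> omega),
      show pvPureBest [("зажигалка", 20), ("компас", 100), ("фрукты", 500), ("рубашка", 300), ("термос", 1000), ("аптечка", 200), ("куртка", 600), ("бинокль", 400), ("удочка", 1200), ("салфетки", 40), ("бутерброды", 820), ("спальный мешок", 2250), ("жвачка", 10)] none = some ("спальный мешок", 2250) from by decide]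
  simp only [Option.elim_some]
  norm_num [sub_sub]
  rw [show bRemove "спальный мешок" [("зажигалка", 20), ("компас", 100), ("фрукты", 500), ("рубашка", 300), ("термос", 1000), ("аптечка", 200), ("куртка", 600), ("бинокль", 400), ("удочка", 1200), ("салфетки", 40), ("бутерброды", 820), ("спальный мешок", 2250), ("жвачка", 10)] = [("зажигалка", 20), ("компас", 100), ("фрукты", 500), ("рубашка", 300), ("термос", 1000), ("аптечка", 200), ("куртка", 600), ("бинокль", 400), ("удочка", 1200), ("салфетки", 40), ("бутерброды", 820), ("жвачка", 10)] from by decide]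
  rw [show (13:Nat) = 12+1 from rfl, bLoop_step,
      bScan_eq [("зажигалка", 20), ("компас", 100), ("фрукты", 500), ("рубашка", 300), ("термос", 1000), ("аптечка", 200), ("куртка", 600), ("бинокль", 400), ("удочка", 1200), ("салфетки", 40), ("бутерброды", 820), ("жвачка", 10)] (w * 1000 - 7750) none
        (by intro p hp; fin_cases hp <;> (try simp) <;> omega),
      show pvPureBest [("зажигалка", 20), ("компас", 100), ("фрукты", 500), ("рубашка", 300), ("термос", 1000), ("аптечка", 200), ("куртка", 600), ("бинокль", 400), ("удочка", 1200), ("салфетки", 40), ("бутерброды", 820), ("жвачка", 10)] none = some ("удочка", 1200) from by decide]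
  simp only [Option.elim_some]
  norm_num [sub_sub]
  rw [show bRemove "удочка" [("зажигалка", 20), ("компас", 100), ("фрукты", 500), ("рубашка", 300), ("термос", 1000), ("аптечка", 200), ("куртка", 600), ("бинокль", 400), ("удочка", 1200), ("салфетки", 40), ("бутерброды", 820), ("жвачка", 10)] = [("зажигалка", 20), ("компас", 100), ("фрукты", 500), ("рубашка", 300), ("термос", 1000), ("аптечка", 200), ("куртка", 600), ("бинокль", 400), ("салфетки", 40), ("бутерброды", 820), ("жвачка", 10)] from by decide]
  rw [show (12:Nat) = 11+1 from rfl, bLoop_step,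
      bScan_eq [("зажигалка", 20), ("компас", 100), ("фрукты", 500), ("рубашка", 300), ("термос", 1000), ("аптечка", 200), ("куртка", 600), ("бинокль", 400), ("салфетки", 40), ("бутерброды", 820), ("жвачка", 10)] (w * 1000 - 8950) none
        (by intro p hp; fin_cases hp <;> (try simp) <;> omega),
      show pvPureBest [("зажигалка", 20), ("компас", 100), ("фрукты", 500), ("рубашка", 300), ("термос", 1000), ("аптечка", 200), ("куртка", 600), ("бинокль", 400), ("салфетки", 40), ("бутерброды", 820), ("жвачка", 10)] none = some ("термос", 1000) from by decide]
  simp only [Option.elim_some]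
  norm_num [sub_sub]
  rw [show bRemove "термос" [("зажигалка", 20), ("компас", 100), ("фрукты", 500), ("рубашка", 300), ("термос", 1000), ("аптечка", 200), ("куртка", 600), ("бинокль", 400), ("салфетки", 40), ("бутерброды", 820), ("жвачка", 10)] = [("зажигалка", 20), ("компас", 100), ("фрукты", 500), ("рубашка", 300), ("аптечка", 200), ("куртка", 600), ("бинокль", 400), ("салфетки", 40), ("бутерброды", 820), ("жвачка", 10)] from by decide]
  rw [show (11:Nat) = 10+1 from rfl, bLoop_step,
      bScan_eq [("зажигалка", 20), ("компас", 100), ("фрукты", 500), ("рубашка", 300), ("аптечка", 200), ("куртка", 600), ("бинокль", 400), ("салфетки", 40), ("бутерброды", 820), ("жвачка", 10)] (w * 1000 - 9950) none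
        (by intro p hp; fin_cases hp <;> (try simp) <;> omega),
      show pvPureBest [("зажигалка", 20), ("компас", 100), ("фрукты", 500), ("рубашка", 300), ("аптечка", 200), ("куртка", 600), ("бинокль", 400), ("салфетки", 40), ("бутерброды", 820), ("жвачка", 10)] none = some ("бутерброды", 820) from by decide]
  simp only [Option.elim_some]
  norm_num [sub_sub]
  rw [show bRemove "бутерброды" [("зажигалка", 20), ("компас", 100), ("фрукты", 500), ("рубашка", 300), ("аптечка", 200), ("куртка", 600), ("бинокль", 400), ("салфетки", 40), ("бутерброды", 820), ("жвачка", 10)] = [("зажигалка", 20), ("компас", 100), ("фрукты", 500), ("рубашка", 300), ("аптечка", 200), ("куртка", 600), ("бинокль", 400), ("салфетки", 40), ("жвачка", 10)] from by decide]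
  rw [show (10:Nat) = 9+1 from rfl, bLoop_step,
      bScan_eq [("зажигалка", 20), ("компас", 100), ("фрукты", 500), ("рубашка", 300), ("аптечка", 200), ("куртка", 600), ("бинокль", 400), ("салфетки", 40), ("жвачка", 10)] (w * 1000 - 10770) none
        (by intro p hp; fin_cases hp <;> (try simp) <;> omega),
      show pvPureBest [("зажигалка", 20), ("компас", 100), ("фрукты", 500), ("рубашка", 300), ("аптечка", 200), ("куртка", 600), ("бинокль", 400), ("салфетки", 40), ("жвачка", 10)] none = some ("куртка", 600) from by decide]
  simp only [Option.elim_some]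
  norm_num [sub_sub]
  rw [show bRemove "куртка" [("зажигалка", 20), ("компас", 100), ("фрукты", 500), ("рубашка", 300), ("аптечка", 200), ("куртка", 600), ("бинокль", 400), ("салфетки", 40), ("жвачка", 10)] = [("зажигалка", 20), ("компас", 100), ("фрукты", 500), ("рубашка", 300), ("аптечка", 200), ("бинокль", 400), ("салфетки", 40), ("жвачка", 10)] from by decide]
  rw [show (9:Nat) = 8+1 from rfl, bLoop_step,
      bScan_eq [("зажигалка", 20), ("компас", 100), ("фрукты", 500), ("рубашка", 300), ("аптечка", 200), ("бинокль", 400), ("салфетки", 40), ("жвачка", 10)] (w * 1000 - 11370) none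
        (by intro p hp; fin_cases hp <;> (try simp) <;> omega),
      show pvPureBest [("зажигалка", 20), ("компас", 100), ("фрукты", 500), ("рубашка", 300), ("аптечка", 200), ("бинокль", 400), ("салфетки", 40), ("жвачка", 10)] none = some ("фрукты", 500) from by decide]
  simp only [Option.elim_some]
  norm_num [sub_sub]
  rw [show bRemove "фрукты" [("зажигалка", 20), ("компас", 100), ("фрукты", 500), ("рубашка", 300), ("аптечка", 200), ("бинокль", 400), ("салфетки", 40), ("жвачка", 10)] = [("зажигалка", 20), ("компас", 100), ("рубашка", 300), ("аптечка", 200), ("бинокль", 400), ("салфетки", 40), ("жвачка", 10)] from by decide]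
  rw [show (8:Nat) = 7+1 from rfl, bLoop_step,
      bScan_eq [("зажигалка", 20), ("компас", 100), ("рубашка", 300), ("аптечка", 200), ("бинокль", 400), ("салфетки", 40), ("жвачка", 10)] (w * 1000 - 11870) none
        (by intro p hp; fin_cases hp <;> (try simp) <;> omega),
      show pvPureBest [("зажигалка", 20), ("компас", 100), ("рубашка", 300), ("аптечка", 200), ("бинокль", 400), ("салфетки", 40), ("жвачка", 10)] none = some ("бинокль", 400) from by decide]
  simp only [Option.elim_some]
  norm_num [sub_sub]
  rw [show bRemove "бинокль" [("зажигалка", 20), ("компас", 100), ("рубашка", 300), ("аптечка", 200), ("бинокль", 400), ("салфетки", 40), ("жвачка", 10)] = [("зажигалка", 20), ("компас", 100), ("рубашка", 300), ("аптечка", 200), ("салфетки", 40), ("жвачка", 10)] from by decide]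
  rw [show (7:Nat) = 6+1 from rfl, bLoop_step,
      bScan_eq [("зажигалка", 20), ("компас", 100), ("рубашка", 300), ("аптечка", 200), ("салфетки", 40), ("жвачка", 10)] (w * 1000 - 12270) none
        (by intro p hp; fin_cases hp <;> (try simp) <;> omega),
      show pvPureBest [("зажигалка", 20), ("компас", 100), ("рубашка", 300), ("аптечка", 200), ("салфетки", 40), ("жвачка", 10)] none = some ("рубашка", 300) from by decide]
  simp only [Option.elim_some]
  norm_num [sub_sub]
  rw [show bRemove "рубашка" [("зажигалка", 20), ("компас", 100), ("рубашка", 300), ("аптечка", 200), ("салфетки", 40), ("жвачка", 10)] = [("зажигалка", 20), ("компас", 100), ("аптечка", 200), ("салфетки", 40), ("жвачка", 10)] from by decide]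
  rw [show (6:Nat) = 5+1 from rfl, bLoop_step,
      bScan_eq [("зажигалка", 20), ("компас", 100), ("аптечка", 200), ("салфетки", 40), ("жвачка", 10)] (w * 1000 - 12570) none
        (by intro p hp; fin_cases hp <;> (try simp) <;> omega),
      show pvPureBest [("зажигалка", 20), ("компас", 100), ("аптечка", 200), ("салфетки", 40), ("жвачка", 10)] none = some ("аптечка", 200) from by decide]
  simp only [Option.elim_some]
  norm_num [sub_sub]
  rw [show bRemove "аптечка" [("зажигалка", 20), ("компас", 100), ("аптечка", 200), ("салфетки", 40), ("жвачка", 10)] = [("зажигалка", 20), ("компас", 100), ("салфетки", 40), ("жвачка", 10)] from by decide]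
  rw [show (5:Nat) = 4+1 from rfl, bLoop_step,
      bScan_eq [("зажигалка", 20), ("компас", 100), ("салфетки", 40), ("жвачка", 10)] (w * 1000 - 12770) none
        (by intro p hp; fin_cases hp <;> (try simp) <;> omega),
      show pvPureBest [("зажигалка", 20), ("компас", 100), ("салфетки", 40), ("жвачка", 10)] none = some ("компас", 100) from by decide]
  simp only [Option.elim_some]
  norm_num [sub_sub]
  rw [show bRemove "компас" [("зажигалка", 20), ("компас", 100), ("салфетки", 40), ("жвачка", 10)] = [("зажигалка", 20), ("салфетки", 40), ("жвачка", 10)] from by decide]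
  rw [show (4:Nat) = 3+1 from rfl, bLoop_step,
      bScan_eq [("зажигалка", 20), ("салфетки", 40), ("жвачка", 10)] (w * 1000 - 12870) none
        (by intro p hp; fin_cases hp <;> (try simp) <;> omega),
      show pvPureBest [("зажигалка", 20), ("салфетки", 40), ("жвачка", 10)] none = some ("салфетки", 40) from by decide]
  simp only [Option.elim_some]
  norm_num [sub_sub]
  rw [show bRemove "салфетки" [("зажигалка", 20), ("салфетки", 40), ("жвачка", 10)] = [("зажигалка", 20), ("жвачка", 10)] from by decide]
  rw [show (3:Nat) = 2+1 from rfl, bLoop_step,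
      bScan_eq [("зажигалка", 20), ("жвачка", 10)] (w * 1000 - 12910) none
        (by intro p hp; fin_cases hp <;> (try simp) <;> omega),
      show pvPureBest [("зажигалка", 20), ("жвачка", 10)] none = some ("зажигалка", 20) from by decide]
  simp only [Option.elim_some]
  norm_num [sub_sub]
  rw [show bRemove "зажигалка" [("зажигалка", 20), ("жвачка", 10)] = [("жвачка", 10)] from by decide]
  rw [show (2:Nat) = 1+1 from rfl, bLoop_step,
      bScan_eq [("жвачка", 10)] (w * 1000 - 12930) none
        (by intro p hp; fin_cases hp <;> (try simp) <;> omega),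
      show pvPureBest [("жвачка", 10)] none = some ("жвачка", 10) from by decide]
  simp only [Option.elim_some]
  norm_num [sub_sub]
  rw [show bRemove "жвачка" [("жвачка", 10)] = ([] : List (String × Int)) from by decide]
  rw [show (1:Nat) = 0+1 from rfl, bLoop_step,
      bScan_eq ([] : List (String × Int)) (w * 1000 - 12940) none (by intro p hp; simp at hp),
      show pvPureBest ([] : List (String × Int)) none = none from rfl]
  rfl

-- ===== VERDICT (by name: the statement is the Claim_ definition above) =====
theorem max_weight_count_spec : Claim_equal_max_weight_count := by
  intro w _
  unfold Spec_max_weight_count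
  by_cases h : w ≤ 0
  · rw [a_nonpos w h, b_nonpos w h]
  · by_cases h2 : 13 ≤ w
    · rw [a_big w h2, b_big w h2]
    · have h1 : 1 ≤ w := by omega
      have h12 : w ≤ 12 := by omega
      interval_cases w <;> decide
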